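-- pv_equiv track=rewrite | github.com/For-Anonymous-Use/CaWs-Segmentation-and-Detection | my_package/two_pass.py | remap
-- ===== SOURCE A (Python) =====
-- from copy import deepcopy
--
-- def remap(idx_dict) -> dict:
--     index_dict = deepcopy(idx_dict)
--     for id in idx_dict:
--         idv = idx_dict[id]
--         while idv in idx_dict:
--             if idv == idx_dict[idv]:
--                 break
--             idv = idx_dict[idv]
--         index_dict[id] = idv
--     return index_dict
-- ===== SOURCE B (Python) =====
-- def remap(idx_dict) -> dict:
--     # Pointer-jumping: square the mapping O(log n) times so every key reaches
--     # its chain endpoint, instead of walking the chain separately per key.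
--     n = len(idx_dict)
--     jump = dict(idx_dict)
--     s = 1
--     while s <= n:
--         jump = {k: jump.get(v, v) for k, v in jump.items()}
--         s *= 2
--     return {k: jump.get(v, v) for k, v in idx_dict.items()}
-- ===== Notes on version B (the rewrite author's own statement) =====
-- stated objective: alternative
-- what changed: Replaces A's per-key chain walk (restarted from scratch for every key) by pointer jumping: the whole mapping is squared O(log n) times so each squaring pass doubles every key's jump distance, then one final pass reads off each endpoint.
-- outside the precondition, e.g. on remap({1: 2, 2: 1}): A does not finish within the time limit, B returns {1: 2, 2: 1}
import Mathlib
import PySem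

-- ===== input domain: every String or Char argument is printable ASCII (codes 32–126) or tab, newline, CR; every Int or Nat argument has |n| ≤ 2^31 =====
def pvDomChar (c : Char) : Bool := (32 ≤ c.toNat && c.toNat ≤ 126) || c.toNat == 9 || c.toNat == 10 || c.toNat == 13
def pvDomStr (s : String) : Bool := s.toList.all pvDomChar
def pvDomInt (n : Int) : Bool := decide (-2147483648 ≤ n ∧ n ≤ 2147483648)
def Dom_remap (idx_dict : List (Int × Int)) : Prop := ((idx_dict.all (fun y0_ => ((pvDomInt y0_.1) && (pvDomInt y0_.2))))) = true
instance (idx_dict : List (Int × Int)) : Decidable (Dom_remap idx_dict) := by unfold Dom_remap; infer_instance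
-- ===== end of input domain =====

-- B replaces A's per-key chain walk by pointer jumping (repeated squaring of the whole
-- mapping, O(log n) passes); equivalence is about the return value (neither mutates its input).

-- ===== PORT A =====
-- the while loop of A, with fuel (under Pre_ every chain reaches its endpoint in ≤ |dict| steps)
def resolveA (d : PySem.Dict Int Int) : Nat → Int → Int
  | 0, idv => idv
  | fuel+1, idv =>
    match d.get? idv with
    | none => idv                             -- 'while idv in idx_dict' fails
    | some nxt => if idv = nxt then idv else resolveA d fuel nxt

def remap (idx_dict : List (Int × Int)) : List (Int × Int) :=
  -- index_dict = deepcopy(idx_dict); for id in idx_dict: … ; index_dict[id] = idv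
  ((PySem.Dict.keys (PySem.Dict.mk idx_dict)).foldl
    (fun acc id => acc.insert id
      (resolveA (PySem.Dict.mk idx_dict) (idx_dict.length + 1)
        ((PySem.Dict.mk idx_dict).getD id id)))
    (PySem.Dict.mk idx_dict)).items
  -- d.getD id id: id is drawn from d's keys, so the Python lookup idx_dict[id] cannot raise

-- ===== PORT B =====
-- jump = {k: jump.get(v, v) for k, v in jump.items()}
def squareStep (jump : PySem.Dict Int Int) : PySem.Dict Int Int :=
  PySem.Dict.mk (jump.items.map (fun p => (p.1, jump.getD p.2 p.2)))

-- while s <= n: jump = square(jump); s *= 2   (fuel n+1 bounds the ≤ log₂(n)+1 iterations)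
def jumpLoop (n : Nat) : Nat → Nat → PySem.Dict Int Int → PySem.Dict Int Int
  | 0, _, jump => jump
  | fuel+1, s, jump => if s ≤ n then jumpLoop n fuel (s * 2) (squareStep jump) else jump

def remap_alt (idx_dict : List (Int × Int)) : List (Int × Int) :=
  -- return {k: jump.get(v, v) for k, v in idx_dict.items()}
  idx_dict.map (fun p =>
    (p.1, (jumpLoop idx_dict.length (idx_dict.length + 1) 1 (PySem.Dict.mk idx_dict)).getD p.2 p.2))

-- ===== PRECONDITION & SPEC =====
-- one application of the mapping (keys step to their value, non-keys stay put)
def fstep (idx_dict : List (Int × Int)) (v : Int) : Int :=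
  (PySem.Dict.mk idx_dict).getD v v

-- Pre_ excludes (a) association lists with duplicate keys, which cannot arise from a Python
-- dict, and (b) mappings with a cycle of length ≥ 2 among the keys, on which A loops forever.
def Pre_remap (idx_dict : List (Int × Int)) : Prop :=
  (idx_dict.map Prod.fst).Nodup ∧
  ∀ k ∈ idx_dict.map Prod.fst, fstep idx_dict k ≠ k →
    ∀ m ∈ List.range idx_dict.length, (fstep idx_dict)^[m + 1] k ≠ k
instance (idx_dict : List (Int × Int)) : Decidable (Pre_remap idx_dict) := by
  unfold Pre_remap; infer_instance

def pvWitness_remap : (List (Int × Int)) := [(1, 2), (2, 2), (5, 7)]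

def Spec_remap (idx_dict : List (Int × Int)) (out : List (Int × Int)) : Prop := out = remap_alt idx_dict
instance (idx_dict : List (Int × Int)) (out : List (Int × Int)) : Decidable (Spec_remap idx_dict out) := by unfold Spec_remap; infer_instance

-- ===== CLAIM (what is proved, stated in full; the proofs are below) =====
def Claim_equal_remap : Prop := ∀ (idx_dict : List (Int × Int)), Dom_remap idx_dict → Pre_remap idx_dict → Spec_remap idx_dict (remap idx_dict)

-- ===== LEMMAS AND PROOFS =====

-- a pair of the list is what fstep returns on its key (unique keys)
theorem fstep_mem {d : List (Int × Int)} (hnd : (d.map Prod.fst).Nodup)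
    {p : Int × Int} (hp : p ∈ d) : fstep d p.1 = p.2 := by
  unfold fstep
  exact PySem.Dict.getD_of_mem_items (PySem.Dict.mk d) hp hnd p.1

-- outside the keys, fstep is the identity
theorem fstep_not_mem {d : List (Int × Int)} {v : Int}
    (hv : v ∉ d.map Prod.fst) : fstep d v = v := by
  unfold fstep
  apply PySem.Dict.getD_of_not_contains
  rw [← Bool.not_eq_true]
  intro hc
  exact hv ((PySem.Dict.contains_iff_mem_keys _ _).1 hc)

theorem mem_of_fstep_ne {d : List (Int × Int)} {v : Int}
    (hv : fstep d v ≠ v) : v ∈ d.map Prod.fst := by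
  by_contra h; exact hv (fstep_not_mem h)

-- pigeonhole: under Pre_, every chain reaches a fixed point of fstep within |d| steps
theorem exists_terminal {d : List (Int × Int)} (hpre : Pre_remap d) (v : Int) :
    ∃ i ≤ d.length, fstep d ((fstep d)^[i] v) = (fstep d)^[i] v := by
  obtain ⟨hnd, hcyc⟩ := hpre
  by_contra hno
  push Not at hno
  have hmaps : ∀ i ∈ Finset.range (d.length + 1),
      (fstep d)^[i] v ∈ (d.map Prod.fst).toFinset := by
    intro i hi
    rw [List.mem_toFinset]
    exact mem_of_fstep_ne (hno i (by simpa using Nat.lt_succ_iff.mp (Finset.mem_range.1 hi)))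
  have hcard : (d.map Prod.fst).toFinset.card < (Finset.range (d.length + 1)).card := by
    have h1 : (d.map Prod.fst).toFinset.card ≤ d.length := by
      calc (d.map Prod.fst).toFinset.card ≤ (d.map Prod.fst).length := List.toFinset_card_le _
        _ = d.length := List.length_map ..
    simpa using Nat.lt_succ_of_le h1
  obtain ⟨i, hi, j, hj, hne, heq⟩ :=
    Finset.exists_ne_map_eq_of_card_lt_of_maps_to hcard hmaps
  -- wlog i < j
  rcases Nat.lt_or_ge i j with hij | hij
  case _ =>
    have hiL : i ≤ d.length := Nat.lt_succ_iff.mp (Finset.mem_range.1 hi)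
    have hjL : j ≤ d.length := Nat.lt_succ_iff.mp (Finset.mem_range.1 hj)
    set k := (fstep d)^[i] v with hk
    have hkmem : k ∈ d.map Prod.fst := by
      rw [← List.mem_toFinset]; exact hmaps i hi
    have hkne : fstep d k ≠ k := hno i hiL
    have hcycle : (fstep d)^[(j - i - 1) + 1] k = k := by
      have : (j - i) + i = j := by omega
      have h2 : (fstep d)^[j - i] ((fstep d)^[i] v) = (fstep d)^[j] v := by
        rw [← Function.iterate_add_apply, this]
      have h3 : (j - i - 1) + 1 = j - i := by omega
      rw [h3, hk, h2, ← heq]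
    have hmrange : j - i - 1 ∈ List.range d.length := by
      rw [List.mem_range]; omega
    exact hcyc k hkmem hkne _ hmrange hcycle
  case _ =>
    have hji : j < i := by omega
    have hiL : i ≤ d.length := Nat.lt_succ_iff.mp (Finset.mem_range.1 hi)
    set k := (fstep d)^[j] v with hk
    have hkmem : k ∈ d.map Prod.fst := by
      rw [← List.mem_toFinset]; exact hmaps j hj
    have hkne : fstep d k ≠ k := hno j (by omega)
    have hcycle : (fstep d)^[(i - j - 1) + 1] k = k := by
      have : (i - j) + j = i := by omega
      have h2 : (fstep d)^[i - j] ((fstep d)^[j] v) = (fstep d)^[i] v := by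
        rw [← Function.iterate_add_apply, this]
      have h3 : (i - j - 1) + 1 = i - j := by omega
      rw [h3, hk, h2, heq]
    have hmrange : i - j - 1 ∈ List.range d.length := by
      rw [List.mem_range]; omega
    exact hcyc k hkmem hkne _ hmrange hcycle

-- resolveA at a fixed point returns it
theorem resolveA_fixed {d : List (Int × Int)} {v : Int}
    (hv : fstep d v = v) (fuel : Nat) : resolveA (PySem.Dict.mk d) fuel v = v := by
  cases fuel with
  | zero => rfl
  | succ f =>
    unfold resolveA
    cases hg : (PySem.Dict.mk d).get? v with
    | none => rfl
    | some nxt =>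
      have : fstep d v = nxt := by
        unfold fstep; rw [PySem.Dict.getD_eq_get?_getD, hg]; rfl
      have hvn : v = nxt := by rw [← this, hv]
      simp [hvn]

-- resolveA steps through fstep when not at a fixed point
theorem resolveA_step {d : List (Int × Int)} {v : Int}
    (hv : fstep d v ≠ v) (fuel : Nat) :
    resolveA (PySem.Dict.mk d) (fuel + 1) v = resolveA (PySem.Dict.mk d) fuel (fstep d v) := by
  unfold resolveA
  cases hg : (PySem.Dict.mk d).get? v with
  | none =>
    exfalso; apply hv
    unfold fstep; rw [PySem.Dict.getD_eq_get?_getD, hg]; rfl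
  | some nxt =>
    have hfs : fstep d v = nxt := by
      unfold fstep; rw [PySem.Dict.getD_eq_get?_getD, hg]; rfl
    have hne : v ≠ nxt := by rw [← hfs]; exact fun h => hv h.symm
    simp only [hfs, if_neg hne]
    rw [resolveA.eq_def]

-- resolveA lands on the first fixed point of the chain
theorem resolveA_eq_iterate {d : List (Int × Int)} :
    ∀ (fuel : Nat) (v : Int) (i : Nat), i ≤ fuel →
      fstep d ((fstep d)^[i] v) = (fstep d)^[i] v →
      ∃ j ≤ i, fstep d ((fstep d)^[j] v) = (fstep d)^[j] v ∧
        resolveA (PySem.Dict.mk d) fuel v = (fstep d)^[j] v := by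
  intro fuel
  induction fuel with
  | zero =>
    intro v i hi hterm
    interval_cases i
    exact ⟨0, le_refl _, hterm, by simpa using (resolveA_fixed (by simpa using hterm) 0)⟩
  | succ f ih =>
    intro v i hi hterm
    by_cases hv : fstep d v = v
    · exact ⟨0, Nat.zero_le _, by simpa using hv, by simpa using resolveA_fixed hv (f + 1)⟩
    · have hi0 : i ≠ 0 := by
        intro h; subst h; simp at hterm; exact hv hterm
      have hterm' : fstep d ((fstep d)^[i - 1] (fstep d v)) = (fstep d)^[i - 1] (fstep d v) := by
        have : (fstep d)^[i - 1] (fstep d v) = (fstep d)^[i] v := by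
          rw [← Function.iterate_succ_apply]
          congr 1; omega
        rw [this]; exact hterm
      obtain ⟨j, hj, hjt, hjv⟩ := ih (fstep d v) (i - 1) (by omega) hterm'
      refine ⟨j + 1, by omega, ?_, ?_⟩
      · rw [Function.iterate_succ_apply]; exact hjt
      · rw [resolveA_step hv, hjv, Function.iterate_succ_apply]

-- the dict holding k ↦ (fstep)^[t] k for every key k of d
def mapIter (d : List (Int × Int)) (t : Nat) : PySem.Dict Int Int :=
  PySem.Dict.mk (d.map (fun p => (p.1, (fstep d)^[t] p.1)))

theorem keys_mapIter (d : List (Int × Int)) (t : Nat) :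
    (mapIter d t).keys = d.map Prod.fst := by
  unfold mapIter PySem.Dict.keys
  simp

theorem getD_mapIter {d : List (Int × Int)} (hnd : (d.map Prod.fst).Nodup)
    (t : Nat) (x : Int) : (mapIter d t).getD x x = (fstep d)^[t] x := by
  by_cases hx : x ∈ d.map Prod.fst
  · obtain ⟨p, hp, hpx⟩ := List.mem_map.1 hx
    have hmem : (x, (fstep d)^[t] x) ∈ (mapIter d t).items := by
      unfold mapIter
      exact List.mem_map.2 ⟨p, hp, by rw [hpx]⟩
    apply PySem.Dict.getD_of_mem_items _ hmem
    rw [keys_mapIter]; exact hnd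
  · have h1 : (mapIter d t).getD x x = x := by
      apply PySem.Dict.getD_of_not_contains
      rw [← Bool.not_eq_true]
      intro hc
      rw [PySem.Dict.contains_iff_mem_keys, keys_mapIter] at hc
      exact hx hc
    rw [h1, Function.iterate_fixed (fstep_not_mem hx) t]

theorem squareStep_mapIter {d : List (Int × Int)} (hnd : (d.map Prod.fst).Nodup)
    (t : Nat) : squareStep (mapIter d t) = mapIter d (t * 2) := by
  have hitems : (mapIter d t).items = d.map (fun p => (p.1, (fstep d)^[t] p.1)) := rfl
  unfold squareStep
  rw [hitems]
  show PySem.Dict.mk _ = PySem.Dict.mk _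
  congr 1
  rw [List.map_map]
  apply List.map_congr_left
  intro p _
  simp only [Function.comp]
  congr 1
  rw [getD_mapIter hnd]
  rw [← Function.iterate_add_apply]
  congr 1; omega

theorem mapIter_one {d : List (Int × Int)} (hnd : (d.map Prod.fst).Nodup) :
    mapIter d 1 = PySem.Dict.mk d := by
  unfold mapIter
  congr 1
  calc d.map (fun p => (p.1, (fstep d)^[1] p.1))
      = d.map id := by
        apply List.map_congr_left
        intro p hp
        simp only [Function.iterate_one, id]
        rw [fstep_mem hnd hp]
    _ = d := List.map_id d

theorem jumpLoop_spec {d : List (Int × Int)} (hnd : (d.map Prod.fst).Nodup) :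
    ∀ (fuel s : Nat), 1 ≤ s → d.length < s * 2 ^ fuel →
      ∃ S, d.length < S ∧
        jumpLoop d.length fuel s (mapIter d s) = mapIter d S := by
  intro fuel
  induction fuel with
  | zero =>
    intro s hs hlt
    exact ⟨s, by simpa using hlt, rfl⟩
  | succ f ih =>
    intro s hs hlt
    unfold jumpLoop
    by_cases hle : s ≤ d.length
    · rw [if_pos hle, squareStep_mapIter hnd]
      apply ih (s * 2) (by omega)
      calc d.length < s * 2 ^ (f + 1) := hlt
        _ = s * 2 * 2 ^ f := by ring
    · rw [if_neg hle]
      exact ⟨s, by omega, rfl⟩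

-- the value A's fold inserts for a key equals B's jump-table value, for any S > |d|
theorem value_agree {d : List (Int × Int)} (hpre : Pre_remap d)
    {S : Nat} (hS : d.length < S) (v : Int) :
    resolveA (PySem.Dict.mk d) (d.length + 1) v = (fstep d)^[S] v := by
  obtain ⟨i, hi, hterm⟩ := exists_terminal hpre v
  obtain ⟨j, hj, hjt, hjv⟩ := resolveA_eq_iterate (d.length + 1) v i (by omega) hterm
  rw [hjv]
  have : (fstep d)^[S] v = (fstep d)^[S - j] ((fstep d)^[j] v) := by
    rw [← Function.iterate_add_apply]
    congr 1; omega
  rw [this, Function.iterate_fixed hjt]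

-- getD after a fold of key-only inserts
theorem getD_foldl_insert (g : Int → Int) (k : Int) (dflt : Int) :
    ∀ (L : List Int) (acc : PySem.Dict Int Int),
      (L.foldl (fun a x => a.insert x (g x)) acc).getD k dflt =
        if k ∈ L then g k else acc.getD k dflt := by
  intro L
  induction L with
  | nil => intro acc; simp
  | cons x L' ih =>
    intro acc
    rw [List.foldl_cons, ih]
    by_cases hk : k ∈ L'
    · simp [hk]
    · rw [if_neg hk, PySem.Dict.getD_insert]
      by_cases hkx : k = x
      · simp [hkx]
      · simp [hkx, hk]

theorem keys_after_fold {d : List (Int × Int)}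
    (g : Int → Int) :
    ((d.map Prod.fst).foldl (fun a x => a.insert x (g x)) (PySem.Dict.mk d)).keys
      = d.map Prod.fst := by
  rw [PySem.Dict.keys_foldl_insert (f := fun _ x => g x)]
  have hk : (PySem.Dict.mk d).keys = d.map Prod.fst := rfl
  rw [hk, PySem.Set.update_eq_append_filter]
  have : List.filter (fun y => !(PySem.Set.contains (d.map Prod.fst) y))
      (PySem.Set.ofList (d.map Prod.fst)) = [] := by
    rw [List.filter_eq_nil_iff]
    intro y hy
    have hmem : y ∈ d.map Prod.fst := (PySem.Set.mem_ofList _ _).1 hy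
    obtain ⟨p, hp, hpy⟩ := List.mem_map.1 hmem
    simp
    exact ⟨p.2, by rw [← hpy]; exact hp⟩
  rw [this, List.append_nil]

-- A's result, elementwise
theorem remap_items {d : List (Int × Int)} (hnd : (d.map Prod.fst).Nodup) :
    remap d = d.map
      (fun p => (p.1, resolveA (PySem.Dict.mk d) (d.length + 1)
        ((PySem.Dict.mk d).getD p.1 p.1))) := by
  have hfold : remap d =
      ((d.map Prod.fst).foldl (fun a x => a.insert x
        (resolveA (PySem.Dict.mk d) (d.length + 1) ((PySem.Dict.mk d).getD x x)))
        (PySem.Dict.mk d)).items := rfl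
  rw [hfold]
  set g : Int → Int :=
    fun id => resolveA (PySem.Dict.mk d) (d.length + 1) ((PySem.Dict.mk d).getD id id) with hg
  set dfin := (d.map Prod.fst).foldl (fun a x => a.insert x (g x)) (PySem.Dict.mk d) with hdfin
  have hfk : dfin.keys = d.map Prod.fst := keys_after_fold g
  have hfnd : dfin.keys.Nodup := by rw [hfk]; exact hnd
  rw [PySem.Dict.items_eq_map_keys dfin hfnd 0, hfk, List.map_map]
  apply List.map_congr_left
  intro p hp
  simp only [Function.comp]
  congr 1
  rw [hdfin, getD_foldl_insert]
  rw [if_pos (List.mem_map.2 ⟨p, hp, rfl⟩)]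

-- ===== VERDICT (by name: the statement is the Claim_ definition above) =====
theorem remap_spec : Claim_equal_remap := by
  intro d _hdom hpre
  unfold Spec_remap
  obtain ⟨hnd, -⟩ := id hpre
  -- B's side
  unfold remap_alt
  have hstart : (PySem.Dict.mk d) = mapIter d 1 := (mapIter_one hnd).symm
  have hpow : d.length < 1 * 2 ^ (d.length + 1) := by
    have h1 : d.length < 2 ^ d.length := Nat.lt_two_pow_self
    have h2 : (2:Nat) ^ d.length ≤ 2 ^ (d.length + 1) :=
      Nat.pow_le_pow_right (by norm_num) (by omega)
    omega
  obtain ⟨S, hS, hloop⟩ := jumpLoop_spec hnd (d.length + 1) 1 (le_refl 1) hpow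
  rw [hstart, hloop]
  -- A's side
  rw [remap_items hnd]
  apply List.map_congr_left
  intro p hp
  congr 1
  have hv : (PySem.Dict.mk d).getD p.1 p.1 = p.2 :=
    PySem.Dict.getD_of_mem_items _ hp hnd p.1
  rw [hv, getD_mapIter hnd, value_agree hpre hS]
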